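-- pv_equiv track=rewrite | github.com/kfir639/computersProject_kfir_eisner | main.py | extract_col_data
-- ===== SOURCE A (Python) =====
-- def extract_col_data(data_matrix):
--     extracted_data = {}
--
--     for col in range(len(data_matrix[0])):
--         col_data = []
--         for row in range(1, len(data_matrix)):
--             try:
--                 col_data.append(data_matrix[row][col])
--             except IndexError:
--                 # An exception is thrown here on invalid length of data
--                 # We will validate and handle that later
--                 pass
--
--         extracted_data[data_matrix[0][col]] = col_data
--
--     return extracted_data
-- ===== SOURCE B (Python) =====
-- def extract_col_data(data_matrix):
--     header = data_matrix[0]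
--     columns = [[] for _ in header]
--     for row in data_matrix[1:]:
--         for col, cell in enumerate(row):
--             if col < len(header):
--                 columns[col].append(cell)
--     return dict(zip(header, columns))
-- ===== Notes on version B (the rewrite author's own statement) =====
-- stated objective: idiomatic
-- what changed: Replaces A's column-outer nested indexing loop (re-scanning all rows per column, with try/except for short rows) by a single row-major pass that distributes each row's cells into pre-allocated column lists, finishing with dict(zip(header, columns)).
import Mathlib
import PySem

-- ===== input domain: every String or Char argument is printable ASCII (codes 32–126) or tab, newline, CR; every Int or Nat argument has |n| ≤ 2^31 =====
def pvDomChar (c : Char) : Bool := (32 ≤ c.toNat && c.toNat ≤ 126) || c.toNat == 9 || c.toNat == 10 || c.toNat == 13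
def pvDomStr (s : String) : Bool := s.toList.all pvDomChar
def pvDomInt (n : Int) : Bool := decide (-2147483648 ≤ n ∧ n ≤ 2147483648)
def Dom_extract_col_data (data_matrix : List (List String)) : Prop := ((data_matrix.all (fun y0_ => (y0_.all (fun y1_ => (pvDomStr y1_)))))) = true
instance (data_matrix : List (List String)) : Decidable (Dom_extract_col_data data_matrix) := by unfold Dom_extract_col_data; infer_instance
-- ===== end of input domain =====

-- B replaces A's column-outer nested indexing (with its try/except skip of short rows) by one
-- row-major pass distributing cells into pre-allocated column lists, then dict(zip(header, columns)).

-- ===== PORT A =====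
def extract_col_data (data_matrix : List (List String)) : List (String × List String) :=
  let hdr := PySem.List.pyGetD data_matrix 0 []      -- data_matrix[0]; IndexError on [] is excluded by Pre_
  ((PySem.List.pyRange 0 (hdr.length : Int) 1).foldl
    (fun (d : PySem.Dict String (List String)) col =>
      let colData := (PySem.List.pyRange 1 (data_matrix.length : Int) 1).foldl
        (fun acc row =>
          match PySem.List.pyGet? (PySem.List.pyGetD data_matrix row []) col with
          | some c => acc ++ [c]                     -- col_data.append(...)
          | none => acc)                             -- except IndexError: pass
        ([] : List String)
      d.insert (PySem.List.pyGetD hdr col "") colData)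
    PySem.Dict.empty).items

-- ===== PORT B =====
def extract_col_data_alt (data_matrix : List (List String)) : List (String × List String) :=
  let header := PySem.List.pyGetD data_matrix 0 []   -- data_matrix[0]; raises on [] too (outside Pre_)
  let cols0 : List (List String) := header.map (fun _ => [])
  let cols := (PySem.List.slice data_matrix (some 1) none).foldl
    (fun cols row =>
      (PySem.List.enumerate row).foldl
        (fun cs p =>
          if p.1 < (header.length : Int) then
            PySem.List.pySetD cs p.1 (PySem.List.pyGetD cs p.1 [] ++ [p.2])   -- columns[col].append(cell)
          else cs)
        cols)
    cols0
  (PySem.Dict.ofList (header.zip cols)).items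

-- ===== PRECONDITION & SPEC =====
-- Pre_ excludes only the empty matrix, on which Python A raises IndexError at data_matrix[0].
def Pre_extract_col_data (data_matrix : List (List String)) : Prop := data_matrix ≠ []
instance (data_matrix : List (List String)) : Decidable (Pre_extract_col_data data_matrix) := by unfold Pre_extract_col_data; infer_instance
def pvWitness_extract_col_data : List (List String) := [["a", "b"], ["1", "2"], ["3"]]

def Spec_extract_col_data (data_matrix : List (List String)) (out : List (String × List String)) : Prop := out = extract_col_data_alt data_matrix
instance (data_matrix : List (List String)) (out : List (String × List String)) : Decidable (Spec_extract_col_data data_matrix out) := by unfold Spec_extract_col_data; infer_instance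

-- ===== CLAIM (what is proved, stated in full; the proofs are below) =====
def Claim_equal_extract_col_data : Prop := ∀ (data_matrix : List (List String)), Dom_extract_col_data data_matrix → Pre_extract_col_data data_matrix → Spec_extract_col_data data_matrix (extract_col_data data_matrix)

-- ===== LEMMAS AND PROOFS =====

-- the column j of the body rows, as both programs accumulate it
def pvCol (t : List (List String)) (j : Nat) : List String :=
  t.foldl (fun acc r => acc ++ (r[j]?).toList) []

-- setting index s of a map-over-range just overrides the function at s
lemma pv_mapRange_set (n s : Nat) (g : Nat → List String) (v : List String) :
    ((List.range n).map g).set s v = (List.range n).map (fun j => if j = s then v else g j) := by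
  apply List.ext_getElem
  · simp
  · intro i h1 h2
    simp only [List.getElem_set, List.getElem_map, List.getElem_range] at *
    by_cases h : s = i <;> simp [h, eq_comm]

-- one row of B's inner loop, over enumerate with an arbitrary start
lemma pv_row_step (row : List String) : ∀ (s : Nat) (n : Nat) (g : Nat → List String),
    (PySem.List.enumerate row (s : Int)).foldl
      (fun cs p =>
        if p.1 < (n : Int) then
          PySem.List.pySetD cs p.1 (PySem.List.pyGetD cs p.1 [] ++ [p.2])
        else cs)
      ((List.range n).map g)
    = (List.range n).map (fun j => g j ++ (if s ≤ j then (row[j - s]?).toList else [])) := by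
  induction row with
  | nil =>
      intro s n g
      simp [PySem.List.enumerate]
  | cons c rest ih =>
      intro s n g
      rw [PySem.List.enumerate_cons]
      by_cases hs : s < n
      · simp only [List.foldl_cons]
        rw [if_pos (by exact_mod_cast hs)]
        rw [PySem.List.pyGetD_natCast, PySem.List.pySetD_natCast,
            List.getD_eq_getElem _ _ (by simpa using hs), List.getElem_map, List.getElem_range,
            pv_mapRange_set n s g _]
        have : ((s : Int) + 1) = ((s + 1 : Nat) : Int) := by push_cast; ring
        rw [this, ih (s + 1) n _]
        apply List.map_congr_left
        intro j _
        by_cases hj : j = s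
        · subst hj; simp
        · rcases lt_or_gt_of_ne hj with h | h
          · simp [if_neg hj, Nat.not_le.mpr h, Nat.not_le.mpr (Nat.lt_succ_of_lt h)]
          · have h1 : s ≤ j := le_of_lt h
            have h2 : s + 1 ≤ j := h
            simp only [if_neg hj, if_pos h1, if_pos h2]
            have : j - s = (j - (s + 1)) + 1 := by omega
            rw [this, List.getElem?_cons_succ]
      · simp only [List.foldl_cons]
        rw [if_neg (by exact_mod_cast hs)]
        have : ((s : Int) + 1) = ((s + 1 : Nat) : Int) := by push_cast; ring
        rw [this, ih (s + 1) n g]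
        apply List.map_congr_left
        intro j hj
        have hjn : j < n := by simpa using hj
        have h1 : ¬ s ≤ j := by omega
        have h2 : ¬ s + 1 ≤ j := by omega
        simp [h1, h2]

-- B's outer loop over the body rows, as a map over column indices
lemma pv_rows (t : List (List String)) : ∀ (n : Nat) (g : Nat → List String),
    t.foldl
      (fun cols row =>
        (PySem.List.enumerate row).foldl
          (fun cs p =>
            if p.1 < (n : Int) then
              PySem.List.pySetD cs p.1 (PySem.List.pyGetD cs p.1 [] ++ [p.2])
            else cs)
          cols)
      ((List.range n).map g)
    = (List.range n).map (fun j => t.foldl (fun acc r => acc ++ (r[j]?).toList) (g j)) := by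
  induction t with
  | nil => intro n g; rfl
  | cons r t ih =>
      intro n g
      simp only [List.foldl_cons]
      rw [show (PySem.List.enumerate r) = (PySem.List.enumerate r ((0 : Nat) : Int)) from rfl,
          pv_row_step r 0 n g, ih n _]
      apply List.map_congr_left
      intro j _
      simp

-- A's inner fold over one column equals the append-of-option form
lemma pv_colA (t : List (List String)) (j : Nat) :
    t.foldl
      (fun acc r =>
        match PySem.List.pyGet? r ((j : Nat) : Int) with
        | some c => acc ++ [c]
        | none => acc)
      ([] : List String)
    = pvCol t j := by
  unfold pvCol
  apply PySem.List.foldl_congr_mem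
  intro acc r _
  rw [PySem.List.pyGet?_natCast]
  cases r[j]? <;> simp

-- A's inner row loop over pyRange, as a fold over the body rows
lemma pv_innerA (m : List (List String)) (col : Int) :
    (PySem.List.pyRange 1 (m.length : Int) 1).foldl
      (fun acc row =>
        match PySem.List.pyGet? (PySem.List.pyGetD m row []) col with
        | some c => acc ++ [c]
        | none => acc)
      ([] : List String)
    = (m.drop 1).foldl
      (fun acc r =>
        match PySem.List.pyGet? r col with
        | some c => acc ++ [c]
        | none => acc)
      ([] : List String) := by
  have := PySem.List.foldl_pyRange_pyGetD' m ([] : List String)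
    (fun acc r =>
      match PySem.List.pyGet? r col with
      | some c => acc ++ [c]
      | none => acc)
    ([] : List String) (a := 1) (by norm_num)
  simpa using this

-- zip of the header with a map over range, as a map over range
lemma pv_zip (h : List String) (G : Nat → List String) :
    h.zip ((List.range h.length).map G)
    = (List.range h.length).map (fun j => (h.getD j "", G j)) := by
  apply List.ext_getElem
  · simp
  · intro i h1 h2
    have hi : i < h.length := by simpa using h2
    simp [List.getElem_zip, List.getElem?_eq_getElem hi]

-- ===== VERDICT (by name: the statement is the Claim_ definition above) =====
theorem extract_col_data_spec : Claim_equal_extract_col_data := by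
  intro m _ hpre
  unfold Spec_extract_col_data
  match m with
  | [] => exact absurd rfl hpre
  | h :: t =>
    simp only [extract_col_data, extract_col_data_alt,
      PySem.List.pyGetD_zero_cons, PySem.List.slice_from_one, List.tail_cons]
    -- A side: inner row loop over pyRange becomes a fold over t
    simp only [pv_innerA, List.drop_one, List.tail_cons]
    -- A side: outer col loop over pyRange becomes a fold over List.range
    rw [show ((h.length : Int)) = (((h.length : Nat) : Int)) from rfl, PySem.List.pyRange_zero_nat,
        List.foldl_map]
    -- B side: columns list, start as a map over range
    have hc0 : h.map (fun _ => ([] : List String)) = (List.range h.length).map (fun _ => []) := by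
      simp [List.map_const']
    rw [hc0, pv_rows t h.length (fun _ => []), pv_zip]
    -- both sides are the same insert-fold
    have hof : PySem.Dict.ofList
          ((List.range h.length).map (fun j => (h.getD j "", List.foldl (fun acc r => acc ++ (r[j]?).toList) [] t)))
        = ((List.range h.length).map (fun j => (h.getD j "", List.foldl (fun acc r => acc ++ (r[j]?).toList) [] t))).foldl
            (fun d p => d.insert p.1 p.2) PySem.Dict.empty := rfl
    rw [hof, List.foldl_map]
    congr 1
    apply PySem.List.foldl_congr_mem
    intro d j hj
    have hcol := pv_colA t j
    unfold pvCol at hcol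
    rw [hcol, PySem.List.pyGetD_natCast]
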